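-- pv_equiv track=rewrite | github.com/kabachok-vpanike/BPEedition | unknown_chords_utils.py | convert_solfege_chord_to_anglo_saxon
-- ===== SOURCE A (Python) =====
-- def convert_solfege_chord_to_anglo_saxon(chord):
--     solfege_to_anglo_saxon = {
--         "DO": "C",
--         "RE": "D",
--         "MI": "E",
--         "FA": "F",
--         "SOL": "G",
--         "LA": "A",
--         "SI": "B"
--     }
--
--     for latin_note, anglo_saxon_note in solfege_to_anglo_saxon.items():
--         if latin_note in chord:
--             chord = chord.replace(latin_note, anglo_saxon_note)
--     return chord
-- ===== SOURCE B (Python) =====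
-- def convert_solfege_chord_to_anglo_saxon(chord):
--     out = []
--     i = 0
--     n = len(chord)
--     while i < n:
--         if chord.startswith("SOL", i):
--             out.append("G"); i += 3
--         elif chord.startswith("DO", i):
--             out.append("C"); i += 2
--         elif chord.startswith("RE", i):
--             out.append("D"); i += 2
--         elif chord.startswith("MI", i):
--             out.append("E"); i += 2
--         elif chord.startswith("FA", i):
--             out.append("F"); i += 2
--         elif chord.startswith("LA", i):
--             out.append("A"); i += 2
--         elif chord.startswith("SI", i):
--             out.append("B"); i += 2
--         else:
--             out.append(chord[i]); i += 1
--     return "".join(out)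
-- ===== Notes on version B (the rewrite author's own statement) =====
-- stated objective: alternative
-- what changed: A applies seven sequential global str.replace passes (one per solfege token, in dict order); B makes a single greedy left-to-right scan that matches a token at the current position (SOL before the 2-char tokens), emits its Anglo-Saxon letter and never rescans emitted output.
import Mathlib
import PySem

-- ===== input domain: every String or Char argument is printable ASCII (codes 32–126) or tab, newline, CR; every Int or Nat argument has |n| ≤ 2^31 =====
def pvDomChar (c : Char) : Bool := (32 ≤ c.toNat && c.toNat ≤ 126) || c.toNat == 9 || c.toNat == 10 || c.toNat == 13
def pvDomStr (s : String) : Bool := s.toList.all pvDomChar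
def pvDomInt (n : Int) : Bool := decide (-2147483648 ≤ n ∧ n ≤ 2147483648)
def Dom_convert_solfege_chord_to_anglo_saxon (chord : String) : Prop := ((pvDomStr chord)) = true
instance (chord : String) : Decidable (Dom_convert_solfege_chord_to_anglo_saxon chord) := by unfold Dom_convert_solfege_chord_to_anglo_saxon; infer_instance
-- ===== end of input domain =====

-- B replaces A's seven sequential global str.replace passes by a single greedy
-- left-to-right scan that emits each mapped letter once (alternative decomposition, same result).


-- ===== PORT A =====
def convert_solfege_chord_to_anglo_saxon (chord : String) : String :=
  let solfege_to_anglo_saxon : PySem.Dict String String :=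
    PySem.Dict.ofList
      [("DO", "C"), ("RE", "D"), ("MI", "E"), ("FA", "F"), ("SOL", "G"), ("LA", "A"), ("SI", "B")]
  solfege_to_anglo_saxon.items.foldl
    (fun chord p =>
      if PySem.Str.isIn p.1 chord then PySem.Str.replace chord p.1 p.2 else chord)
    chord

-- ===== PORT B =====
-- single left-to-right scan: match a solfège token at the current position
-- (SOL first, then the 2-char tokens), emit its letter, otherwise copy the char
def pvScan : List Char → List Char
  | 'S'::'O'::'L'::t => 'G' :: pvScan t
  | 'D'::'O'::t => 'C' :: pvScan t
  | 'R'::'E'::t => 'D' :: pvScan t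
  | 'M'::'I'::t => 'E' :: pvScan t
  | 'F'::'A'::t => 'F' :: pvScan t
  | 'L'::'A'::t => 'A' :: pvScan t
  | 'S'::'I'::t => 'B' :: pvScan t
  | c :: t => c :: pvScan t
  | [] => []

def convert_solfege_chord_to_anglo_saxon_alt (chord : String) : String :=
  String.ofList (pvScan chord.toList)

-- ===== PRECONDITION & SPEC =====
def Spec_convert_solfege_chord_to_anglo_saxon (chord : String) (out : String) : Prop := out = convert_solfege_chord_to_anglo_saxon_alt chord
instance (chord : String) (out : String) : Decidable (Spec_convert_solfege_chord_to_anglo_saxon chord out) := by unfold Spec_convert_solfege_chord_to_anglo_saxon; infer_instance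

-- ===== CLAIM (what is proved, stated in full; the proofs are below) =====
def Claim_equal_convert_solfege_chord_to_anglo_saxon : Prop := ∀ (chord : String), Dom_convert_solfege_chord_to_anglo_saxon chord → Spec_convert_solfege_chord_to_anglo_saxon chord (convert_solfege_chord_to_anglo_saxon chord)

-- ===== LEMMAS AND PROOFS =====

-- A's one pass `if k in s then s.replace(k, q) else s`, on lists
def pvStep (k q l : List Char) : List Char :=
  if PySem.Chars.isIn k l then PySem.Chars.replace l k q else l

-- A's whole loop body: the seven passes in dict order, on lists
def pvChain (l : List Char) : List Char :=
  pvStep ['S','I'] ['B'] (pvStep ['L','A'] ['A'] (pvStep ['S','O','L'] ['G']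
    (pvStep ['F','A'] ['F'] (pvStep ['M','I'] ['E'] (pvStep ['R','E'] ['D']
      (pvStep ['D','O'] ['C'] l))))))

-- ----- recurrence equations for PySem.Chars.replace (nonempty pattern) -----

theorem go_spec (k : Char) (ks nw : List Char) :
    ∀ (fuel : Nat) (l acc : List Char), l.length ≤ fuel →
      PySem.Chars.replace.go (k::ks) nw fuel l acc
        = acc.reverse ++ PySem.Chars.replace.go (k::ks) nw l.length l [] := by
  intro fuel
  induction fuel using Nat.strong_induction_on with
  | _ fuel ih =>
    intro l acc h
    cases fuel with
    | zero =>
      have : l = [] := List.eq_nil_of_length_eq_zero (Nat.le_zero.mp h)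
      subst this
      simp [PySem.Chars.replace.go]
    | succ f =>
      cases l with
      | nil => simp [PySem.Chars.replace.go]
      | cons c t =>
        simp only [List.length_cons] at h
        rw [PySem.Chars.replace.go.eq_def]
        conv_rhs => rw [List.length_cons, PySem.Chars.replace.go.eq_def]
        by_cases hp : (k::ks).isPrefixOf (c::t) = true
        · simp only [hp, if_true]
          have hd : (List.drop (k::ks).length (c::t)).length ≤ f := by
            simp [List.length_drop]; omega
          have hd2 : (List.drop (k::ks).length (c::t)).length ≤ t.length := by
            simp [List.length_drop]
          rw [ih f (Nat.lt_succ_self f) _ _ hd,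
              ih t.length (by omega) _ _ hd2]
          simp
        · simp only [hp, if_false, Bool.false_eq_true]
          rw [ih f (Nat.lt_succ_self f) _ _ (by omega)]
          rw [ih t.length (by omega) t [c] (Nat.le_refl _)]
          simp

theorem replace_eq_go (k : Char) (ks q u : List Char) :
    PySem.Chars.replace u (k::ks) q = PySem.Chars.replace.go (k::ks) q u.length u [] := by
  simp [PySem.Chars.replace]

theorem rep_nil (k : Char) (ks q : List Char) : PySem.Chars.replace [] (k::ks) q = [] := by
  simp [PySem.Chars.replace, PySem.Chars.replace.go]

@[simp] theorem rep_cons {k : Char} {ks q : List Char} {c : Char} {u : List Char}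
    (h : ¬ (k::ks) <+: (c::u)) :
    PySem.Chars.replace (c::u) (k::ks) q = c :: PySem.Chars.replace u (k::ks) q := by
  rw [replace_eq_go, replace_eq_go]
  rw [List.length_cons, PySem.Chars.replace.go.eq_def]
  have hp : (k::ks).isPrefixOf (c::u) = false := by
    rw [← Bool.not_eq_true]
    simpa [List.isPrefixOf_iff_prefix] using h
  simp only [hp, if_false, Bool.false_eq_true]
  rw [go_spec _ _ _ _ _ _ (Nat.le_refl _)]
  simp

@[simp] theorem rep_cons1 {k : Char} {ks q : List Char} {c : Char} {u : List Char}
    (h : k ≠ c) :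
    PySem.Chars.replace (c::u) (k::ks) q = c :: PySem.Chars.replace u (k::ks) q :=
  rep_cons (fun hp => h (List.cons_prefix_cons.mp hp).1)

theorem rep_pref {k : Char} {ks q u : List Char} :
    PySem.Chars.replace ((k::ks) ++ u) (k::ks) q = q ++ PySem.Chars.replace u (k::ks) q := by
  rw [replace_eq_go, replace_eq_go]
  have hlen : ((k::ks) ++ u).length = (ks.length + u.length) + 1 := by simp
  rw [hlen, List.cons_append, PySem.Chars.replace.go.eq_def]
  have hpre : (k::ks).isPrefixOf ((k::ks) ++ u) = true :=
    List.isPrefixOf_iff_prefix.mpr (List.prefix_append _ _)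
  rw [List.cons_append] at hpre
  simp only [hpre, if_true]
  have hdrop : List.drop (k::ks).length (k :: (ks ++ u)) = u := by
    simp
  rw [hdrop, go_spec _ _ _ _ _ _ (by omega)]
  simp

theorem rep_head {k : Char} {ks : List Char} {x : Char} {u : List Char} :
    (PySem.Chars.replace u (k::ks) [x]).head? = u.head?
    ∨ (PySem.Chars.replace u (k::ks) [x]).head? = some x := by
  cases u with
  | nil => left; rw [rep_nil]
  | cons c t =>
    by_cases hp : (k::ks) <+: (c::t)
    · right
      obtain ⟨v, hv⟩ := hp
      rw [← hv, rep_pref]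
      simp
    · left
      rw [rep_cons hp]
      simp

-- if the pattern never occurs, replace is the identity (A's `else` branch)
theorem rep_id {k : Char} {ks q : List Char} : ∀ {u : List Char},
    ¬ (k::ks) <:+: u → PySem.Chars.replace u (k::ks) q = u := by
  intro u
  induction u with
  | nil => intro _; exact rep_nil k ks q
  | cons c t iht =>
    intro h
    rw [List.infix_cons_iff] at h
    push Not at h
    rw [rep_cons h.1, iht h.2]

theorem step_eq {k : Char} {ks q u : List Char} :
    pvStep (k::ks) q u = PySem.Chars.replace u (k::ks) q := by
  unfold pvStep
  by_cases h : PySem.Chars.isIn (k::ks) u = true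
  · simp [h]
  · rw [Bool.not_eq_true] at h
    rw [h, if_neg (by simp), rep_id ((PySem.Chars.isIn_eq_false_iff _ _).mp h)]

-- prefix-firing equations in cons form (so they match goal terms syntactically)
@[simp] theorem rep_pref2 {a b : Char} {q u : List Char} :
    PySem.Chars.replace (a::b::u) [a,b] q = q ++ PySem.Chars.replace u [a,b] q := by
  simpa using rep_pref (k := a) (ks := [b]) (q := q) (u := u)

@[simp] theorem rep_pref3 {a b c : Char} {q u : List Char} :
    PySem.Chars.replace (a::b::c::u) [a,b,c] q = q ++ PySem.Chars.replace u [a,b,c] q := by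
  simpa using rep_pref (k := a) (ks := [b,c]) (q := q) (u := u)

-- SOL does not fire on "SI…" (second char differs)
@[simp] theorem rep_SOL_SI (u q : List Char) :
    PySem.Chars.replace ('S'::'I'::u) ['S','O','L'] q
      = 'S' :: PySem.Chars.replace ('I'::u) ['S','O','L'] q :=
  rep_cons (by simp [List.cons_prefix_cons])

-- how A's chain steps across each matched token
theorem chain_nil : pvChain [] = [] := by
  simp only [pvChain, step_eq, rep_nil]

theorem chain_SOL (t : List Char) : pvChain ('S'::'O'::'L'::t) = 'G' :: pvChain t := by
  simp only [pvChain, step_eq]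
  simp

theorem chain_DO (t : List Char) : pvChain ('D'::'O'::t) = 'C' :: pvChain t := by
  simp only [pvChain, step_eq]
  simp

theorem chain_RE (t : List Char) : pvChain ('R'::'E'::t) = 'D' :: pvChain t := by
  simp only [pvChain, step_eq]
  simp

theorem chain_MI (t : List Char) : pvChain ('M'::'I'::t) = 'E' :: pvChain t := by
  simp only [pvChain, step_eq]
  simp

theorem chain_FA (t : List Char) : pvChain ('F'::'A'::t) = 'F' :: pvChain t := by
  simp only [pvChain, step_eq]
  simp

theorem chain_LA (t : List Char) : pvChain ('L'::'A'::t) = 'A' :: pvChain t := by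
  simp only [pvChain, step_eq]
  simp

theorem chain_SI (t : List Char) : pvChain ('S'::'I'::t) = 'B' :: pvChain t := by
  simp only [pvChain, step_eq]
  simp

-- a replacement by a letter x ≠ y cannot create a leading y
theorem head_repl_ne {k : Char} {ks : List Char} {x y : Char} {u : List Char}
    (hxy : x ≠ y) (h : (PySem.Chars.replace u (k::ks) [x]).head? = some y) :
    u.head? = some y := by
  rcases rep_head (k := k) (ks := ks) (x := x) (u := u) with h' | h'
  · rw [h] at h'; exact h'.symm
  · rw [h] at h'; simp at h'; exact absurd h'.symm hxy

theorem head_two {a b c : Char} {v : List Char} (hp : [a,b] <+: c :: v) :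
    a = c ∧ v.head? = some b := by
  obtain ⟨hc, hp2⟩ := List.cons_prefix_cons.mp hp
  refine ⟨hc, ?_⟩
  cases v with
  | nil => simp at hp2
  | cons d v2 =>
    obtain ⟨hd, _⟩ := List.cons_prefix_cons.mp hp2
    simp [← hd]

theorem head_eq_some_cons {v : List Char} {x : Char} (h : v.head? = some x) :
    ∃ v2, v = x :: v2 := by
  cases v with
  | nil => simp at h
  | cons d v2 => simp at h; exact ⟨v2, by rw [h]⟩

-- when no token matches at the front, every pass of A copies the head char
theorem chain_default (c : Char) (t : List Char)
    (h1 : ∀ t1, c = 'S' → t = 'O'::'L'::t1 → False)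
    (h2 : ∀ t1, c = 'D' → t = 'O'::t1 → False)
    (h3 : ∀ t1, c = 'R' → t = 'E'::t1 → False)
    (h4 : ∀ t1, c = 'M' → t = 'I'::t1 → False)
    (h5 : ∀ t1, c = 'F' → t = 'A'::t1 → False)
    (h6 : ∀ t1, c = 'L' → t = 'A'::t1 → False)
    (h7 : ∀ t1, c = 'S' → t = 'I'::t1 → False) :
    pvChain (c::t) = c :: pvChain t := by
  have hd1 : ¬ (['D','O'] <+: c :: t) := by
    intro hp
    obtain ⟨hc, hh⟩ := head_two hp
    obtain ⟨t2, ht⟩ := head_eq_some_cons hh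
    exact h2 t2 hc.symm ht
  have hd2 : ¬ (['R','E'] <+: c :: PySem.Chars.replace t ['D','O'] ['C']) := by
    intro hp
    obtain ⟨hc, hh⟩ := head_two hp
    have := head_repl_ne (by decide) hh
    obtain ⟨t2, ht⟩ := head_eq_some_cons this
    exact h3 t2 hc.symm ht
  have hd3 : ¬ (['M','I'] <+: c :: PySem.Chars.replace
      (PySem.Chars.replace t ['D','O'] ['C']) ['R','E'] ['D']) := by
    intro hp
    obtain ⟨hc, hh⟩ := head_two hp
    have := head_repl_ne (by decide) (head_repl_ne (by decide) hh)
    obtain ⟨t2, ht⟩ := head_eq_some_cons this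
    exact h4 t2 hc.symm ht
  have hd4 : ¬ (['F','A'] <+: c :: PySem.Chars.replace (PySem.Chars.replace
      (PySem.Chars.replace t ['D','O'] ['C']) ['R','E'] ['D']) ['M','I'] ['E']) := by
    intro hp
    obtain ⟨hc, hh⟩ := head_two hp
    have := head_repl_ne (by decide) (head_repl_ne (by decide) (head_repl_ne (by decide) hh))
    obtain ⟨t2, ht⟩ := head_eq_some_cons this
    exact h5 t2 hc.symm ht
  have hd5 : ¬ (['S','O','L'] <+: c :: PySem.Chars.replace (PySem.Chars.replace
      (PySem.Chars.replace (PySem.Chars.replace t ['D','O'] ['C']) ['R','E'] ['D'])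
      ['M','I'] ['E']) ['F','A'] ['F']) := by
    intro hp
    obtain ⟨hc, hp2⟩ := List.cons_prefix_cons.mp hp
    -- the four passes keep a leading 'O' and the char after it
    have hO : (PySem.Chars.replace (PySem.Chars.replace (PySem.Chars.replace
        (PySem.Chars.replace t ['D','O'] ['C']) ['R','E'] ['D']) ['M','I'] ['E'])
        ['F','A'] ['F']).head? = some 'O' := by
      cases hv : PySem.Chars.replace (PySem.Chars.replace (PySem.Chars.replace
          (PySem.Chars.replace t ['D','O'] ['C']) ['R','E'] ['D']) ['M','I'] ['E'])
          ['F','A'] ['F'] with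
      | nil => rw [hv] at hp2; simp at hp2
      | cons d v2 =>
        rw [hv] at hp2
        obtain ⟨hd, _⟩ := List.cons_prefix_cons.mp hp2
        simp [← hd]
    have hOt := head_repl_ne (by decide) (head_repl_ne (by decide)
      (head_repl_ne (by decide) (head_repl_ne (by decide) hO)))
    obtain ⟨t2, ht2⟩ := head_eq_some_cons hOt
    subst ht2
    -- each pass copies the leading 'O', so the second char is the transform of t2
    rw [rep_cons1 (by decide), rep_cons1 (by decide), rep_cons1 (by decide),
        rep_cons1 (by decide)] at hp2
    obtain ⟨_, hp3⟩ := List.cons_prefix_cons.mp hp2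
    have hL : (PySem.Chars.replace (PySem.Chars.replace (PySem.Chars.replace
        (PySem.Chars.replace t2 ['D','O'] ['C']) ['R','E'] ['D']) ['M','I'] ['E'])
        ['F','A'] ['F']).head? = some 'L' := by
      cases hv : PySem.Chars.replace (PySem.Chars.replace (PySem.Chars.replace
          (PySem.Chars.replace t2 ['D','O'] ['C']) ['R','E'] ['D']) ['M','I'] ['E'])
          ['F','A'] ['F'] with
      | nil => rw [hv] at hp3; simp at hp3
      | cons d v2 =>
        rw [hv] at hp3
        obtain ⟨hd, _⟩ := List.cons_prefix_cons.mp hp3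
        simp [← hd]
    have hLt := head_repl_ne (by decide) (head_repl_ne (by decide)
      (head_repl_ne (by decide) (head_repl_ne (by decide) hL)))
    obtain ⟨t3, ht3⟩ := head_eq_some_cons hLt
    exact h1 t3 hc.symm (by rw [ht3])
  have hd6 : ¬ (['L','A'] <+: c :: PySem.Chars.replace (PySem.Chars.replace
      (PySem.Chars.replace (PySem.Chars.replace (PySem.Chars.replace t ['D','O'] ['C'])
      ['R','E'] ['D']) ['M','I'] ['E']) ['F','A'] ['F']) ['S','O','L'] ['G']) := by
    intro hp
    obtain ⟨hc, hh⟩ := head_two hp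
    have := head_repl_ne (by decide) (head_repl_ne (by decide) (head_repl_ne (by decide)
      (head_repl_ne (by decide) (head_repl_ne (by decide) hh))))
    obtain ⟨t2, ht⟩ := head_eq_some_cons this
    exact h6 t2 hc.symm ht
  have hd7 : ¬ (['S','I'] <+: c :: PySem.Chars.replace (PySem.Chars.replace
      (PySem.Chars.replace (PySem.Chars.replace (PySem.Chars.replace
      (PySem.Chars.replace t ['D','O'] ['C']) ['R','E'] ['D']) ['M','I'] ['E'])
      ['F','A'] ['F']) ['S','O','L'] ['G']) ['L','A'] ['A']) := by
    intro hp
    obtain ⟨hc, hh⟩ := head_two hp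
    have := head_repl_ne (by decide) (head_repl_ne (by decide) (head_repl_ne (by decide)
      (head_repl_ne (by decide) (head_repl_ne (by decide) (head_repl_ne (by decide) hh)))))
    obtain ⟨t2, ht⟩ := head_eq_some_cons this
    exact h7 t2 hc.symm ht
  simp only [pvChain, step_eq]
  rw [rep_cons hd1, rep_cons hd2, rep_cons hd3, rep_cons hd4, rep_cons hd5,
      rep_cons hd6, rep_cons hd7]

-- A's seven passes compute exactly B's single scan
theorem chain_eq_scan (l : List Char) : pvChain l = pvScan l := by
  induction l using pvScan.induct with
  | case1 t ih => rw [chain_SOL, ih, pvScan]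
  | case2 t ih => rw [chain_DO, ih]; rfl
  | case3 t ih => rw [chain_RE, ih]; rfl
  | case4 t ih => rw [chain_MI, ih]; rfl
  | case5 t ih => rw [chain_FA, ih]; rfl
  | case6 t ih => rw [chain_LA, ih]; rfl
  | case7 t ih => rw [chain_SI, ih]; rfl
  | case8 c t g1 g2 g3 g4 g5 g6 g7 ih =>
    rw [chain_default c t g1 g2 g3 g4 g5 g6 g7, ih, pvScan.eq_8 c t g1 g2 g3 g4 g5 g6 g7]
  | case9 => rw [chain_nil]; rfl

-- A's one String-level loop iteration, expressed through pvStep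
theorem strStep (k q s : String) :
    (if PySem.Str.isIn k s then PySem.Str.replace s k q else s)
      = String.ofList (pvStep k.toList q.toList s.toList) := by
  unfold pvStep
  by_cases h : PySem.Str.isIn k s = true
  · have h' : PySem.Chars.isIn k.toList s.toList = true := by
      simpa [PySem.Str.isIn] using h
    rw [if_pos h, if_pos (by simp [h']), PySem.Str.replace]
  · have h' : PySem.Chars.isIn k.toList s.toList = false := by
      simpa [PySem.Str.isIn, Bool.not_eq_true] using h
    rw [if_neg h, if_neg (by simp [h']), String.ofList_toList]

-- A's port, pushed down to lists
theorem portA_toList (chord : String) :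
    (convert_solfege_chord_to_anglo_saxon chord).toList = pvChain chord.toList := by
  unfold convert_solfege_chord_to_anglo_saxon
  show (List.foldl
      (fun chord p => if PySem.Str.isIn p.1 chord = true then PySem.Str.replace chord p.1 p.2 else chord)
      chord
      (PySem.Dict.ofList
        [("DO", "C"), ("RE", "D"), ("MI", "E"), ("FA", "F"), ("SOL", "G"), ("LA", "A"),
          ("SI", "B")] : PySem.Dict String String).items).toList = pvChain chord.toList
  rw [show (PySem.Dict.ofList
        [("DO", "C"), ("RE", "D"), ("MI", "E"), ("FA", "F"), ("SOL", "G"), ("LA", "A"),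
          ("SI", "B")] : PySem.Dict String String).items
      = [("DO", "C"), ("RE", "D"), ("MI", "E"), ("FA", "F"), ("SOL", "G"), ("LA", "A"),
          ("SI", "B")] from by decide]
  simp only [List.foldl_cons, List.foldl_nil]
  simp only [strStep, String.toList_ofList]
  rfl

-- ===== VERDICT (by name: the statement is the Claim_ definition above) =====
theorem convert_solfege_chord_to_anglo_saxon_spec : Claim_equal_convert_solfege_chord_to_anglo_saxon := by
  intro chord _
  unfold Spec_convert_solfege_chord_to_anglo_saxon convert_solfege_chord_to_anglo_saxon_alt
  rw [← chain_eq_scan, ← portA_toList, String.ofList_toList]
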